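-- pv_equiv track=rewrite | github.com/p-dipen/setup_competative_programming | codeforce/Codeforces Round #650 (Div. 3)/practice2/code.py | countStep
-- ===== SOURCE A (Python) =====
-- def findIndex(arr, mo) -> int:
--     for i, j in enumerate(arr):
--         if j % 2 == mo:
--             return i
--
-- def countStep(arr):
--     if len(arr) == 1:
--         return -1
--     cs = 0
--     for i, j in enumerate(arr):
--         mo = i % 2
--         if not (mo == j % 2):
--             swap = findIndex(arr[i + 1:], mo)
--             if swap == 0:
--                 swap = 1
--             arr[i], arr[int(swap) + i] = arr[int(swap) + i], arr[i]
--             cs += 1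
--     return cs
-- ===== SOURCE B (Python) =====
-- # One-pass run-length count: A's swap only changes parities when the found
-- # element is adjacent, so its count is sum of ceil(L/2) over maximal runs of
-- # parity-mismatched positions.  (A also mutates arr in place; B does not --
-- # the equivalence claimed is about the return value only.)
-- def countStep(arr):
--     if len(arr) == 1:
--         return -1
--     cs = 0
--     run = 0
--     for i, j in enumerate(arr):
--         if j % 2 != i % 2:
--             run += 1
--         else:
--             cs += (run + 1) // 2
--             run = 0
--     cs += (run + 1) // 2
--     return cs
-- ===== Notes on version B (the rewrite author's own statement) =====
-- stated objective: faster
-- what changed: Replaced the O(n^2) mutate-and-rescan loop (slice + linear findIndex per mismatch) with a single O(n) pass that counts ceil(L/2) per maximal run of parity-mismatched positions, which is provably A's exact count since A's non-adjacent swaps exchange equal-parity elements and never change the parity string.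
import Mathlib
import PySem

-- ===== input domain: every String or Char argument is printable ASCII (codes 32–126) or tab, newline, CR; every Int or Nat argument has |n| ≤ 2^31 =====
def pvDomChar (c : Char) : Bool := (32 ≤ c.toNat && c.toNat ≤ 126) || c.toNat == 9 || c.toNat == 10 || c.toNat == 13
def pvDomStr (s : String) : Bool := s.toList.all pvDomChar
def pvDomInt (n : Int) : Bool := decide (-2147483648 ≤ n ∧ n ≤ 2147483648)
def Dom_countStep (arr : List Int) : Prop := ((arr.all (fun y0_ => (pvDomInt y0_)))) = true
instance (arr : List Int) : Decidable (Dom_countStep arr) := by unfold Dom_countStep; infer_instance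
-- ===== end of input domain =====

-- B replaces A's quadratic mutate-and-rescan loop by one linear pass counting runs of
-- parity-mismatched positions (objective: faster). A mutates arr in place, B does not:
-- the equivalence claimed is about the RETURN value only.

-- ===== PORT A =====
def findIndexA : List Int → Int → Option Int
  | [], _ => none
  | j :: rest, mo =>
    if PySem.Int.mod j 2 = mo then some 0
    else (findIndexA rest mo).map (· + 1)

def stepA (st : List Int × Int) (i : Nat) : List Int × Int :=
  let a := st.1
  let cs := st.2
  let j := a.getD i 0
  let mo : Int := PySem.Int.mod (i : Int) 2
  if PySem.Int.mod j 2 ≠ mo then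
    match findIndexA (a.drop (i + 1)) mo with
    | none => (a, cs)     -- Python raises TypeError here (int(None)); excluded by Pre_countStep
    | some s0 =>
      let s := if s0 = 0 then 1 else s0
      let t := i + s.toNat
      ((a.set i (a.getD t 0)).set t (a.getD i 0), cs + 1)
  else (a, cs)

def countStep (arr : List Int) : Int :=
  if arr.length = 1 then -1
  else ((List.range arr.length).foldl stepA (arr, 0)).2

-- ===== PORT B =====
def stepB (st : Int × Int) (p : Int × Int) : Int × Int :=
  if PySem.Int.mod p.2 2 ≠ PySem.Int.mod p.1 2 then (st.1, st.2 + 1)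
  else (st.1 + PySem.Int.floordiv (st.2 + 1) 2, 0)

def countStep_alt (arr : List Int) : Int :=
  if arr.length = 1 then -1
  else
    let st := (PySem.List.enumerate arr).foldl stepB (0, 0)
    st.1 + PySem.Int.floordiv (st.2 + 1) 2

-- ===== PRECONDITION & SPEC =====
-- position i of arr holds an element of the wrong parity
def mismAt (arr : List Int) (i : Nat) : Bool :=
  PySem.Int.mod (arr.getD i 0) 2 != PySem.Int.mod (i : Int) 2

-- length of the maximal block of consecutively mismatched positions directly before i
def runBefore (arr : List Int) : Nat → Nat
  | 0 => 0
  | i + 1 => if mismAt arr i then runBefore arr i + 1 else 0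

-- Pre_ excludes exactly the inputs where A raises TypeError: some mismatched position
-- that A's greedy scan actually visits (even run-offset) has no element of the needed
-- parity after it, so findIndex returns None and int(None) raises.
def Pre_countStep (arr : List Int) : Prop :=
  arr.length = 1 ∨
  ∀ i, i < arr.length → mismAt arr i = true → runBefore arr i % 2 = 0 →
    ∃ j, j < arr.length ∧ i < j ∧
      PySem.Int.mod (arr.getD j 0) 2 = PySem.Int.mod (i : Int) 2

instance (arr : List Int) : Decidable (Pre_countStep arr) := by
  unfold Pre_countStep; infer_instance

def pvWitness_countStep : List Int := [0, 1]

def Spec_countStep (arr : List Int) (out : Int) : Prop := out = countStep_alt arr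
instance (arr : List Int) (out : Int) : Decidable (Spec_countStep arr out) := by
  unfold Spec_countStep; infer_instance

-- ===== CLAIM (what is proved, stated in full; the proofs are below) =====
def Claim_equal_countStep : Prop :=
  ∀ (arr : List Int), Dom_countStep arr → Pre_countStep arr →
    Spec_countStep arr (countStep arr)

-- ===== LEMMAS AND PROOFS =====

-- pure count mirroring A's loop on the suffix (mo = parity of the current position)
def cnt : List Int → Int → Int
  | [], _ => 0
  | x :: rest, mo =>
    if PySem.Int.mod x 2 = mo then cnt rest (1 - mo)
    else
      match findIndexA rest mo with
      | none => cnt rest (1 - mo)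
      | some s => if s = 0 then 1 + cnt rest.tail mo else 1 + cnt rest (1 - mo)
termination_by l _ => l.length
decreasing_by all_goals (simp [List.length_tail]; try omega)

-- pure count mirroring B's loop (r = current run of mismatches)
def runCnt : List Int → Int → Int → Int
  | [], _, r => PySem.Int.floordiv (r + 1) 2
  | x :: rest, mo, r =>
    if PySem.Int.mod x 2 ≠ mo then runCnt rest (1 - mo) (r + 1)
    else PySem.Int.floordiv (r + 1) 2 + runCnt rest (1 - mo) 0

-- "A does not crash", phrased along cnt's recursion
def PreCnt : List Int → Int → Prop
  | [], _ => True
  | x :: rest, mo =>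
    if PySem.Int.mod x 2 = mo then PreCnt rest (1 - mo)
    else
      match findIndexA rest mo with
      | none => False
      | some s => if s = 0 then PreCnt rest.tail mo else PreCnt rest (1 - mo)
termination_by l _ => l.length
decreasing_by all_goals (simp [List.length_tail]; try omega)

def SameBits (l l' : List Int) : Prop :=
  l.length = l'.length ∧ ∀ j, l.getD j 0 % 2 = l'.getD j 0 % 2

lemma pm2 (x : Int) : PySem.Int.mod x 2 = x % 2 :=
  PySem.Int.mod_eq_emod_of_pos (by norm_num)

lemma sameBits_tail (l l' : List Int) (h : SameBits l l') : SameBits l.tail l'.tail := by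
  obtain ⟨hl, hb⟩ := h
  cases l with
  | nil =>
    cases l' with
    | nil => exact ⟨rfl, fun _ => rfl⟩
    | cons y ys => simp at hl
  | cons x xs =>
    cases l' with
    | nil => simp at hl
    | cons y ys =>
      refine ⟨by simpa using hl, fun j => ?_⟩
      simpa [List.getD_cons_succ] using hb (j + 1)

lemma findIndexA_congr (l : List Int) : ∀ (l' : List Int) (mo : Int), SameBits l l' →
    findIndexA l mo = findIndexA l' mo := by
  induction l with
  | nil =>
    intro l' mo h
    cases l' with
    | nil => rfl
    | cons y ys => exact absurd h.1 (by simp)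
  | cons x xs ih =>
    intro l' mo h
    cases l' with
    | nil => exact absurd h.1 (by simp)
    | cons y ys =>
      have hhead : x % 2 = y % 2 := by simpa using h.2 0
      have htail : SameBits xs ys := sameBits_tail _ _ h
      simp only [findIndexA, pm2, hhead, ih ys mo htail]

lemma cnt_congr : ∀ (n : Nat) (l l' : List Int), l.length = n → SameBits l l' →
    ∀ mo, cnt l mo = cnt l' mo := by
  intro n
  induction n using Nat.strong_induction_on with
  | _ n ih =>
    intro l l' hn h mo
    cases l with
    | nil =>
      cases l' with
      | nil => rfl
      | cons y ys => exact absurd h.1 (by simp)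
    | cons x xs =>
      cases l' with
      | nil => exact absurd h.1 (by simp)
      | cons y ys =>
        have hhead : x % 2 = y % 2 := by simpa using h.2 0
        have htail : SameBits xs ys := sameBits_tail _ _ h
        have hfi := findIndexA_congr xs ys mo htail
        have hlen : xs.length = n - 1 := by simp at hn; omega
        have hpos : 0 < n := by simp at hn; omega
        by_cases hx : x % 2 = mo
        · rw [cnt, cnt, pm2, pm2, if_pos hx, if_pos (hhead ▸ hx)]
          exact ih (n - 1) (by omega) xs ys hlen htail _
        · rw [cnt, cnt, pm2, pm2, if_neg hx, if_neg (hhead ▸ hx), ← hfi]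
          cases hfx : findIndexA xs mo with
          | none => exact ih (n - 1) (by omega) xs ys hlen htail _
          | some s =>
            by_cases hs : s = 0
            · simp only [hs, if_pos rfl]
              have htt : SameBits xs.tail ys.tail := sameBits_tail _ _ htail
              by_cases hn1 : n - 1 = 0
              · cases xs with
                | nil =>
                  cases ys with
                  | nil => rfl
                  | cons _ _ => exact absurd htail.1 (by simp)
                | cons _ _ => simp at hlen; omega
              · rw [ih (n - 2) (by omega) xs.tail ys.tail
                  (by rw [List.length_tail, hlen]; omega) htt mo]
                simp
            · simp only [if_neg hs]
              rw [ih (n - 1) (by omega) xs ys hlen htail (1 - mo)]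

lemma findIndexA_none_iff (l : List Int) (mo : Int) :
    findIndexA l mo = none ↔ ∀ x ∈ l, x % 2 ≠ mo := by
  induction l with
  | nil => simp [findIndexA]
  | cons x xs ih =>
    by_cases hx : x % 2 = mo
    · simp [findIndexA, pm2, hx]
    · simp [findIndexA, pm2, hx, ih]

lemma findIndexA_some_spec (l : List Int) : ∀ (mo : Int) (s : Int),
    findIndexA l mo = some s →
    0 ≤ s ∧ s.toNat < l.length ∧
    l.getD s.toNat 0 % 2 = mo ∧
    ∀ j < s.toNat, l.getD j 0 % 2 ≠ mo := by
  induction l with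
  | nil => intro mo s h; simp [findIndexA] at h
  | cons x xs ih =>
    intro mo s h
    by_cases hx : x % 2 = mo
    · rw [findIndexA, pm2, if_pos hx] at h
      injection h with h
      subst h
      exact ⟨le_refl 0, by simp, by simpa using hx, by omega⟩
    · rw [findIndexA, pm2, if_neg hx] at h
      simp only [Option.map_eq_some_iff] at h
      obtain ⟨s0, hs0, rfl⟩ := h
      obtain ⟨h0, h1, h2, h3⟩ := ih mo s0 hs0
      have hts : (s0 + 1).toNat = s0.toNat + 1 := by omega
      refine ⟨by omega, by simp [hts]; omega, by simpa [hts] using h2, ?_⟩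
      intro j hj
      rw [hts] at hj
      cases j with
      | zero => simpa using hx
      | succ j' => simpa using h3 j' (by omega)

lemma getD_drop (l : List Int) (m j : Nat) (d : Int) :
    (l.drop m).getD j d = l.getD (m + j) d := by
  simp [List.getD_eq_getElem?_getD, List.getElem?_drop]

lemma mismAt_iff (arr : List Int) (i : Nat) :
    mismAt arr i = true ↔ ¬ (arr.getD i 0 % 2 = (i : Int) % 2) := by
  simp [mismAt, pm2]

lemma drop_cons (arr : List Int) (i : Nat) (h : i < arr.length) :
    arr.drop i = arr.getD i 0 :: arr.drop (i + 1) := by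
  rw [List.drop_eq_getElem_cons h, List.getD_eq_getElem arr 0 h]

lemma mo_succ (i : Nat) : (((i + 1 : Nat)) : Int) % 2 = 1 - (i : Int) % 2 := by
  push_cast; omega

lemma mo_succ2 (i : Nat) : (((i + 2 : Nat)) : Int) % 2 = (i : Int) % 2 := by
  push_cast; omega

lemma getD_set_ne (l : List Int) (n p : Nat) (v d : Int) (h : n ≠ p) :
    (l.set n v).getD p d = l.getD p d := by
  simp [List.getD_eq_getElem?_getD, List.getElem?_set, h]

lemma getD_set_eq (l : List Int) (n : Nat) (v d : Int) (h : n < l.length) :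
    (l.set n v).getD n d = v := by
  simp [List.getD_eq_getElem?_getD, List.getElem?_set, h]

lemma loopA (m : Nat) : ∀ (i : Nat) (a : List Int) (cs : Int), i + m = a.length →
    ((List.range' i m).foldl stepA (a, cs)).2
      = cs + cnt (a.drop i) (PySem.Int.mod (i : Int) 2) := by
  induction m with
  | zero =>
    intro i a cs h
    rw [List.drop_eq_nil_of_le (by omega)]
    simp [cnt]
  | succ m ihm =>
    intro i a cs h
    have hi : i < a.length := by omega
    rw [List.range'_succ, List.foldl_cons, pm2, drop_cons a i hi, cnt, pm2]
    by_cases hx : a.getD i 0 % 2 = (i : Int) % 2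
    · have hstep : stepA (a, cs) i = (a, cs) := by
        simp [stepA, pm2, ← List.getD_eq_getElem?_getD, hx]
      rw [hstep, if_pos hx, ihm (i + 1) a cs (by omega), pm2, mo_succ]
    · have hb0 : a.getD i 0 % 2 = 0 ∨ a.getD i 0 % 2 = 1 := by omega
      rw [if_neg hx]
      cases hfx : findIndexA (a.drop (i + 1)) ((i : Int) % 2) with
      | none =>
        have hstep : stepA (a, cs) i = (a, cs) := by
          simp [stepA, pm2, ← List.getD_eq_getElem?_getD, hx, hfx]
        rw [hstep, ihm (i + 1) a cs (by omega), pm2, mo_succ]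
      | some s =>
        rcases findIndexA_some_spec _ _ _ hfx with ⟨hs0, hslen, hsbit, hsfirst⟩
        have hmatch : (match some s with
              | none => cnt (a.drop (i + 1)) (1 - (i : Int) % 2)
              | some s' => if s' = 0 then 1 + cnt (a.drop (i + 1)).tail ((i : Int) % 2)
                           else 1 + cnt (a.drop (i + 1)) (1 - (i : Int) % 2))
            = if s = 0 then 1 + cnt (a.drop (i + 1)).tail ((i : Int) % 2)
              else 1 + cnt (a.drop (i + 1)) (1 - (i : Int) % 2) := rfl
        rw [hmatch]
        have hdlen : (a.drop (i + 1)).length = a.length - (i + 1) := by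
          simp [List.length_drop]
        have hi1 : i + 1 < a.length := by omega
        by_cases hs : s = 0
        · -- adjacent swap: positions i and i+1 are exchanged
          have hstep : stepA (a, cs) i
              = ((a.set i (a.getD (i + 1) 0)).set (i + 1) (a.getD i 0), cs + 1) := by
            simp [stepA, pm2, ← List.getD_eq_getElem?_getD, hx, hfx, hs]
          set a' := (a.set i (a.getD (i + 1) 0)).set (i + 1) (a.getD i 0) with ha'
          have hlen' : a'.length = a.length := by simp [ha']
          have hdrop' : a'.drop (i + 1) = a.getD i 0 :: a.drop (i + 2) := by
            rw [ha', List.drop_set, List.drop_set, drop_cons a (i + 1) hi1]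
            simp [List.set_cons_zero, show ¬ (i + 1 < i + 1) from by omega,
              show i < i + 1 from by omega, show i + 1 + 1 = i + 2 from by omega]
          rw [hstep, ihm (i + 1) a' (cs + 1) (by rw [hlen']; omega), hdrop', if_pos hs]
          rw [cnt, pm2, pm2, mo_succ]
          rw [if_pos (by omega : a.getD i 0 % 2 = 1 - (i : Int) % 2),
            show (1 : Int) - (1 - (i : Int) % 2) = (i : Int) % 2 by ring,
            List.tail_drop]
          have h12 : i + 1 + 1 = i + 2 := by omega
          rw [h12]
          ring
        · -- distant "swap": both cells hold the same parity, the bits do not change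
          have hstoNat : 1 ≤ s.toNat := by omega
          set t := i + s.toNat with ht
          have htlt : t < a.length := by omega
          have hstep : stepA (a, cs) i
              = ((a.set i (a.getD t 0)).set t (a.getD i 0), cs + 1) := by
            simp [stepA, pm2, ← List.getD_eq_getElem?_getD, hx, hfx, hs, ht]
          set a' := (a.set i (a.getD t 0)).set t (a.getD i 0) with ha'
          have hlen' : a'.length = a.length := by simp [ha']
          -- parity of the overwritten cell is unchanged
          have htbit : a.getD t 0 % 2 ≠ (i : Int) % 2 := by
            have := hsfirst (s.toNat - 1) (by omega)
            rw [getD_drop] at this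
            have harg : i + 1 + (s.toNat - 1) = t := by omega
            rwa [harg] at this
          have hsame : SameBits (a'.drop (i + 1)) (a.drop (i + 1)) := by
            constructor
            · simp [hlen']
            · intro j
              rw [getD_drop, getD_drop]
              by_cases hjt : i + 1 + j = t
              · rw [hjt, ha', getD_set_eq _ t _ _ (by simp [List.length_set]; omega)]
                omega
              · rw [ha', getD_set_ne _ t _ _ _ (fun hcon => hjt hcon.symm),
                  getD_set_ne _ i _ _ _ (by omega)]
          rw [hstep, ihm (i + 1) a' (cs + 1) (by rw [hlen']; omega)]
          rw [cnt_congr (a'.drop (i + 1)).length (a'.drop (i + 1)) (a.drop (i + 1)) rfl hsame]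
          rw [if_neg hs, pm2, mo_succ]
          ring

lemma floordiv_succ2 (r : Int) :
    PySem.Int.floordiv (r + 2 + 1) 2 = 1 + PySem.Int.floordiv (r + 1) 2 := by
  rw [PySem.Int.floordiv_eq_ediv_of_pos (by norm_num),
    PySem.Int.floordiv_eq_ediv_of_pos (by norm_num)]
  omega

lemma runCnt_r2 (l : List Int) : ∀ (mo r : Int),
    runCnt l mo (r + 2) = 1 + runCnt l mo r := by
  induction l with
  | nil => intro mo r; simpa [runCnt] using floordiv_succ2 r
  | cons x xs ih =>
    intro mo r
    by_cases hx : x % 2 = mo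
    · simp [runCnt, pm2, hx]
      generalize runCnt xs (1 - mo) 0 = q
      omega
    · simpa [runCnt, pm2, hx, show r + 2 + 1 = r + 1 + 2 by ring] using ih (1 - mo) (r + 1)

lemma fd12 : PySem.Int.floordiv (0 + 1) 2 = 0 := by
  rw [PySem.Int.floordiv_eq_ediv_of_pos (by norm_num)]; decide

lemma fd22 : PySem.Int.floordiv 2 2 = 1 := by
  rw [PySem.Int.floordiv_eq_ediv_of_pos (by norm_num)]; decide

lemma cnt_eq_runCnt : ∀ (n : Nat) (l : List Int), l.length = n →
    ∀ mo, (mo = 0 ∨ mo = 1) → PreCnt l mo → cnt l mo = runCnt l mo 0 := by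
  intro n
  induction n using Nat.strong_induction_on with
  | _ n ih =>
    intro l hn mo hmo hp
    cases l with
    | nil => simp [cnt, runCnt, fd12]
    | cons x xs =>
      have hlen : xs.length = n - 1 := by simp at hn; omega
      have hxb : x % 2 = 0 ∨ x % 2 = 1 := by omega
      by_cases hx : x % 2 = mo
      · rw [cnt, pm2, if_pos hx]
        rw [PreCnt, pm2, if_pos hx] at hp
        rw [runCnt, pm2, if_neg (by simpa using hx)]
        rw [ih (n - 1) (by simp at hn; omega) xs hlen (1 - mo) (by omega) hp, fd12]
        ring
      · rw [PreCnt, pm2, if_neg hx] at hp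
        rw [cnt, pm2, if_neg hx]
        cases hfx : findIndexA xs mo with
        | none => rw [hfx] at hp; exact absurd hp (by simp)
        | some s =>
          rw [hfx] at hp
          replace hp : if s = 0 then PreCnt xs.tail mo else PreCnt xs (1 - mo) := hp
          rcases findIndexA_some_spec xs mo s hfx with ⟨hs0, hslen, hsbit, hsfirst⟩
          cases xs with
          | nil => simp at hslen
          | cons y rest' =>
            have hrlen : rest'.length = n - 2 := by simp at hn; omega
            show (if s = 0 then 1 + cnt (y :: rest').tail mo
                  else 1 + cnt (y :: rest') (1 - mo)) = runCnt (x :: y :: rest') mo 0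
            by_cases hs : s = 0
            · rw [if_pos hs] at hp ⊢
              have hy : y % 2 = mo := by simpa [hs] using hsbit
              simp only [List.tail_cons] at hp ⊢
              rw [ih (n - 2) (by simp at hn; omega) rest' hrlen mo hmo hp]
              rw [runCnt, pm2, if_pos (by simpa using hx)]
              rw [runCnt, pm2, if_pos (by simp [hy]; omega)]
              rw [show (1 : Int) - (1 - mo) = mo by ring, show (0:Int)+1+1 = 0+2 by ring,
                runCnt_r2]
            · rw [if_neg hs] at hp ⊢
              have hy : y % 2 ≠ mo := by simpa using hsfirst 0 (by omega)
              rw [PreCnt, pm2, if_pos (by omega : y % 2 = 1 - mo),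
                show (1 : Int) - (1 - mo) = mo by ring] at hp
              rw [cnt, pm2, if_pos (by omega : y % 2 = 1 - mo),
                show (1 : Int) - (1 - mo) = mo by ring]
              rw [ih (n - 2) (by simp at hn; omega) rest' hrlen mo hmo hp]
              rw [runCnt, pm2, if_pos (by simpa using hx)]
              rw [runCnt, pm2, if_neg (by simp; omega),
                show (1 : Int) - (1 - mo) = mo by ring, show (0:Int)+1+1 = 2 by ring, fd22]

lemma pre_to_PreCnt (arr : List Int)
    (hpre : ∀ i, i < arr.length → mismAt arr i = true → runBefore arr i % 2 = 0 →
      ∃ j, j < arr.length ∧ i < j ∧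
        PySem.Int.mod (arr.getD j 0) 2 = PySem.Int.mod (i : Int) 2) :
    ∀ (m i : Nat), arr.length - i = m → i ≤ arr.length →
      (runBefore arr i % 2 = 0 ∨ mismAt arr i = false) →
      PreCnt (arr.drop i) (PySem.Int.mod (i : Int) 2) := by
  intro m
  induction m using Nat.strong_induction_on with
  | _ m ih =>
    intro i hm hi hdisj
    rw [pm2]
    by_cases hend : i < arr.length
    · rw [drop_cons arr i hend, PreCnt, pm2]
      by_cases hmx : mismAt arr i = true
      · have hx : ¬ (arr.getD i 0 % 2 = (i : Int) % 2) := (mismAt_iff _ _).1 hmx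
        rw [if_neg hx]
        have hrun : runBefore arr i % 2 = 0 := by
          rcases hdisj with h | h
          · exact h
          · rw [hmx] at h; cases h
        obtain ⟨j, hj, hij, hbit⟩ := hpre i hend hmx hrun
        rw [pm2, pm2] at hbit
        have hmem : arr.getD j 0 ∈ arr.drop (i + 1) := by
          have heq : (arr.drop (i + 1)).getD (j - (i + 1)) 0 = arr.getD j 0 := by
            rw [getD_drop]; congr 1; omega
          have hlt : j - (i + 1) < (arr.drop (i + 1)).length := by
            simp [List.length_drop]; omega
          rw [← heq, List.getD_eq_getElem _ _ hlt]
          exact List.getElem_mem _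
        cases hfx : findIndexA (arr.drop (i + 1)) ((i : Int) % 2) with
        | none => exact absurd hbit ((findIndexA_none_iff _ _).1 hfx _ hmem)
        | some s =>
          rcases findIndexA_some_spec _ _ _ hfx with ⟨hs0, hslen, hsbit, hsfirst⟩
          show if s = 0 then PreCnt (arr.drop (i + 1)).tail ((i : Int) % 2)
               else PreCnt (arr.drop (i + 1)) (1 - (i : Int) % 2)
          by_cases hs : s = 0
          · rw [if_pos hs, List.tail_drop]
            have hhead : arr.getD (i + 1) 0 % 2 = (i : Int) % 2 := by
              have := hsbit; rw [hs] at this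
              simpa [getD_drop] using this
            have hm1 : mismAt arr (i + 1) = true := by
              rw [mismAt_iff, mo_succ]; omega
            have hrun2 : runBefore arr (i + 2) % 2 = 0 := by
              have e2 : runBefore arr (i + 2) = runBefore arr (i + 1) + 1 := by
                simp [runBefore, hm1]
              have e1 : runBefore arr (i + 1) = runBefore arr i + 1 := by
                simp [runBefore, hmx]
              omega
            have hlt1 : i + 1 < arr.length := by
              have := hslen; simp [List.length_drop] at this; omega
            have hres := ih (m - 2) (by omega) (i + 2) (by omega) (by omega) (Or.inl hrun2)
            rw [pm2, mo_succ2] at hres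
            have h12 : i + 1 + 1 = i + 2 := by omega
            rw [h12]
            exact hres
          · rw [if_neg hs]
            have hhead : ¬ (arr.getD (i + 1) 0 % 2 = (i : Int) % 2) := by
              have := hsfirst 0 (by omega)
              simpa [getD_drop] using this
            have hb01 : arr.getD (i + 1) 0 % 2 = 0 ∨ arr.getD (i + 1) 0 % 2 = 1 := by omega
            have hm1 : mismAt arr (i + 1) = false := by
              have : ¬ (mismAt arr (i + 1) = true) := by
                rw [mismAt_iff, mo_succ]; omega
              simpa using this
            have hres := ih (m - 1) (by omega) (i + 1) (by omega) (by omega) (Or.inr hm1)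
            rw [pm2, mo_succ] at hres
            exact hres
      · have hx : arr.getD i 0 % 2 = (i : Int) % 2 := by
          have : ¬¬ (arr.getD i 0 % 2 = (i : Int) % 2) := fun h => hmx ((mismAt_iff _ _).2 h)
          omega
        rw [if_pos hx]
        have hm1 : runBefore arr (i + 1) = 0 := by
          simp only [runBefore]
          rw [if_neg (by simp [hmx])]
        have hres := ih (m - 1) (by omega) (i + 1) (by omega) (by omega) (Or.inl (by rw [hm1]))
        rw [pm2, mo_succ] at hres
        exact hres
    · rw [List.drop_eq_nil_of_le (by omega), PreCnt]
      trivial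

lemma foldB (l : List Int) : ∀ (s : Int) (cs r : Int),
    (((PySem.List.enumerate l s).foldl stepB (cs, r)).1
      + PySem.Int.floordiv ((((PySem.List.enumerate l s).foldl stepB (cs, r)).2) + 1) 2)
      = cs + runCnt l (PySem.Int.mod s 2) r := by
  induction l with
  | nil => intro s cs r; simp [PySem.List.enumerate, runCnt]
  | cons x xs ih =>
    intro s cs r
    rw [PySem.List.enumerate_cons]
    have hsucc : PySem.Int.mod (s + 1) 2 = 1 - PySem.Int.mod s 2 := by
      rw [pm2, pm2]; omega
    by_cases hx : x % 2 = s % 2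
    · have hstep : stepB (cs, r) (s, x) = (cs + PySem.Int.floordiv (r + 1) 2, 0) := by
        simp [stepB, pm2, hx]
      rw [List.foldl_cons, hstep, ih, hsucc]
      rw [runCnt, pm2, pm2, if_neg (by simpa using hx)]
      ring
    · have hstep : stepB (cs, r) (s, x) = (cs, r + 1) := by
        simp [stepB, pm2, hx]
      rw [List.foldl_cons, hstep, ih, hsucc]
      rw [runCnt, pm2, pm2, if_pos (by simpa using hx)]

-- ===== VERDICT (by name: the statement is the Claim_ definition above) =====
theorem countStep_spec : Claim_equal_countStep := by
  unfold Claim_equal_countStep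
  intro arr _dom hpre
  unfold Spec_countStep
  by_cases h1 : arr.length = 1
  · rw [countStep, countStep_alt, if_pos h1, if_pos h1]
  · rw [countStep, countStep_alt, if_neg h1, if_neg h1]
    have hA : ((List.range arr.length).foldl stepA (arr, 0)).2
        = 0 + cnt (arr.drop 0) (PySem.Int.mod ((0 : Nat) : Int) 2) := by
      rw [List.range_eq_range']
      exact loopA arr.length 0 arr 0 (by omega)
    have hmo : PySem.Int.mod ((0 : Nat) : Int) 2 = 0 := by rw [pm2]; simp
    rw [hmo, List.drop_zero] at hA
    rcases hpre with hp1 | hp2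
    · exact absurd hp1 h1
    have hpc : PreCnt arr 0 := by
      have := pre_to_PreCnt arr hp2 arr.length 0 (by omega) (by omega)
        (Or.inl (by simp [runBefore]))
      rw [hmo] at this
      simpa using this
    have hcnt := cnt_eq_runCnt arr.length arr rfl 0 (Or.inl rfl) hpc
    have hB := foldB arr 0 0 0
    rw [show PySem.Int.mod (0 : Int) 2 = 0 from by rw [pm2]; decide] at hB
    rw [hA, hcnt, ← hB]
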